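-- pv_equiv track=rewrite | github.com/ts061282/aoc2024 | Day8b.py | calcNodes
-- ===== SOURCE A (Python) =====
-- import math
--
-- def calcNodes(stationA = [0,0], stationB = [0,0], mapWidth = 0, mapHeight = 0):
--     nodesOnMap = []
--     offset = [stationB[0]-stationA[0],stationB[1]-stationA[1]]
--     lowDenom = min(abs(offset[0]),abs(offset[1]))
--     maxIter = math.ceil(mapWidth/lowDenom)
--     for x in range(0,maxIter):
--         if (stationA[0] - x*offset[0] >= 0 and stationA[0] - x*offset[0] <= mapWidth):
--             if (stationA[1] - x*offset[1] >= 0 and stationA[1] - x*offset[1] <= mapHeight):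
--                 nodesOnMap += [[stationA[0] - x*offset[0],stationA[1] - x*offset[1]]]
--         if (stationB[0] + x*offset[0] >= 0 and stationB[0] + x*offset[0] <= mapWidth):
--             if (stationB[1] + x*offset[1] >= 0 and stationB[1] + x*offset[1] <= mapHeight):
--                 nodesOnMap += [[stationB[0] + x*offset[0],stationB[1] + x*offset[1]]]
--     return nodesOnMap
-- ===== SOURCE B (Python) =====
-- def calcNodes(stationA = [0,0], stationB = [0,0], mapWidth = 0, mapHeight = 0):
--     a0, a1 = stationA[0], stationA[1]
--     b0, b1 = stationB[0], stationB[1]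
--     dx, dy = b0 - a0, b1 - a1
--     lowDenom = min(abs(dx), abs(dy))
--     maxIter = -(-mapWidth // lowDenom)  # exact ceil(mapWidth/lowDenom)
--
--     def interval(c, step, lim):
--         # solve 0 <= c + x*step <= lim for x (step != 0), as [lo, hi]
--         if step > 0:
--             return -((c) // step), (lim - c) // step
--         else:
--             return -((lim - c) // (-step)), c // (-step)
--
--     def clip(xlo, xhi, ylo, yhi):
--         lo, hi = max(xlo, ylo, 0), min(xhi, yhi, maxIter - 1)
--         return (lo, hi) if lo <= hi else (0, -1)
--
--     loA, hiA = clip(*interval(a0, -dx, mapWidth), *interval(a1, -dy, mapHeight))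
--     loB, hiB = clip(*interval(b0, dx, mapWidth), *interval(b1, dy, mapHeight))
--     nodeA = lambda x: [a0 - x * dx, a1 - x * dy]
--     nodeB = lambda x: [b0 + x * dx, b1 + x * dy]
--     return ([nodeA(x) for x in range(loA, min(hiA, loB - 1) + 1)]
--           + [nodeB(x) for x in range(loB, min(hiB, loA - 1) + 1)]
--           + [p for x in range(max(loA, loB), min(hiA, hiB) + 1) for p in (nodeA(x), nodeB(x))]
--           + [nodeA(x) for x in range(max(loA, hiB + 1), hiA + 1)]
--           + [nodeB(x) for x in range(max(loB, hiA + 1), hiB + 1)])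
-- ===== Notes on version B (the rewrite author's own statement) =====
-- stated objective: alternative
-- what changed: B replaces A's per-candidate scan of range(0, ceil(mapWidth/lowDenom)) with closed-form solving of the four bound inequalities: it intersects the resulting x-intervals for the A- and B-emissions with [0, maxIter-1] and emits the nodes as five merged range segments preserving A's interleaved order.
import Mathlib
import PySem

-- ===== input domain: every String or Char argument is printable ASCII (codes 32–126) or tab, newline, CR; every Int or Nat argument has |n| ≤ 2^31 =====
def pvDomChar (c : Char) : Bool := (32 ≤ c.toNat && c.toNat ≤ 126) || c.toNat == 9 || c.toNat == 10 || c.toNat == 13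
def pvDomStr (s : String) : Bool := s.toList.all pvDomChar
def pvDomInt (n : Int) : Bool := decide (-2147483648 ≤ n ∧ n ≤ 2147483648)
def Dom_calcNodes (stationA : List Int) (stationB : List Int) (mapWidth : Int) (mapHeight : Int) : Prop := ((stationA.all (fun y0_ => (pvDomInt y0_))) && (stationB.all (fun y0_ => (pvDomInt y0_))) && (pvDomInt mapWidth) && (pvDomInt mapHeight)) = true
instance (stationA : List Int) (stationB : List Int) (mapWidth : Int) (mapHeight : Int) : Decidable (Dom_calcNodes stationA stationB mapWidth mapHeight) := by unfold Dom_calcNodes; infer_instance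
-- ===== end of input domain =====

-- ===== PORT A =====
-- B replaces A's scan of range(0, ceil(mapWidth/lowDenom)) with closed-form interval intersection; return values proved equal on Pre_.
-- math.ceil(mapWidth/lowDenom) is ported as exact ceiling division -((-mapWidth)//lowDenom); on the Dom_ int range
-- (|mapWidth| <= 2^31 < 2^52) Python's float division rounds to a value with the same ceiling, so this is exact.
def calcNodes (stationA : List Int) (stationB : List Int) (mapWidth : Int) (mapHeight : Int) : List (List Int) :=
  let a0 := PySem.List.pyGetD stationA 0 0
  let a1 := PySem.List.pyGetD stationA 1 0
  let b0 := PySem.List.pyGetD stationB 0 0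
  let b1 := PySem.List.pyGetD stationB 1 0
  let ox := b0 - a0
  let oy := b1 - a1
  let lowDenom := min |ox| |oy|
  let maxIter := -(PySem.Int.floordiv (-mapWidth) lowDenom)
  (PySem.List.pyRange 0 maxIter 1).foldl (fun nodesOnMap x =>
    let nodesOnMap :=
      if 0 ≤ a0 - x * ox ∧ a0 - x * ox ≤ mapWidth then
        (if 0 ≤ a1 - x * oy ∧ a1 - x * oy ≤ mapHeight then nodesOnMap ++ [[a0 - x * ox, a1 - x * oy]] else nodesOnMap)
      else nodesOnMap
    if 0 ≤ b0 + x * ox ∧ b0 + x * ox ≤ mapWidth then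
      (if 0 ≤ b1 + x * oy ∧ b1 + x * oy ≤ mapHeight then nodesOnMap ++ [[b0 + x * ox, b1 + x * oy]] else nodesOnMap)
    else nodesOnMap) []

-- ===== PORT B =====
-- interval c step lim = the x-interval [lo,hi] solving 0 <= c + x*step <= lim (step ≠ 0), by ceil/floor division
def pvInterval (c : Int) (step : Int) (lim : Int) : Int × Int :=
  if step > 0 then (-(PySem.Int.floordiv c step), PySem.Int.floordiv (lim - c) step)
  else (-(PySem.Int.floordiv (lim - c) (-step)), PySem.Int.floordiv c (-step))

-- clip intersects the x- and y-intervals with [0, maxIter-1]; an empty result is normalised to (0, -1)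
def pvClip (maxIter : Int) (xlo : Int) (xhi : Int) (ylo : Int) (yhi : Int) : Int × Int :=
  let lo := max (max xlo ylo) 0
  let hi := min (min xhi yhi) (maxIter - 1)
  if lo ≤ hi then (lo, hi) else (0, -1)

def calcNodes_alt (stationA : List Int) (stationB : List Int) (mapWidth : Int) (mapHeight : Int) : List (List Int) :=
  let a0 := PySem.List.pyGetD stationA 0 0
  let a1 := PySem.List.pyGetD stationA 1 0
  let b0 := PySem.List.pyGetD stationB 0 0
  let b1 := PySem.List.pyGetD stationB 1 0
  let dx := b0 - a0
  let dy := b1 - a1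
  let lowDenom := min |dx| |dy|
  let maxIter := -(PySem.Int.floordiv (-mapWidth) lowDenom)
  let iA := pvInterval a0 (-dx) mapWidth
  let jA := pvInterval a1 (-dy) mapHeight
  let pA := pvClip maxIter iA.1 iA.2 jA.1 jA.2
  let iB := pvInterval b0 dx mapWidth
  let jB := pvInterval b1 dy mapHeight
  let pB := pvClip maxIter iB.1 iB.2 jB.1 jB.2
  let loA := pA.1; let hiA := pA.2
  let loB := pB.1; let hiB := pB.2
  let nodeA := fun x => [a0 - x * dx, a1 - x * dy]
  let nodeB := fun x => [b0 + x * dx, b1 + x * dy]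
  (PySem.List.pyRange loA (min hiA (loB - 1) + 1) 1).map nodeA
    ++ (PySem.List.pyRange loB (min hiB (loA - 1) + 1) 1).map nodeB
    ++ (PySem.List.pyRange (max loA loB) (min hiA hiB + 1) 1).flatMap (fun x => [nodeA x, nodeB x])
    ++ (PySem.List.pyRange (max loA (hiB + 1)) (hiA + 1) 1).map nodeA
    ++ (PySem.List.pyRange (max loB (hiA + 1)) (hiB + 1) 1).map nodeB

-- ===== PRECONDITION & SPEC =====
-- Pre_ excludes exactly the inputs where the Python A raises: stations shorter than 2 (IndexError) and
-- equal x- or y-coordinates, which make lowDenom = 0 (ZeroDivisionError).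
def Pre_calcNodes (stationA : List Int) (stationB : List Int) (mapWidth : Int) (mapHeight : Int) : Prop :=
  2 ≤ stationA.length ∧ 2 ≤ stationB.length ∧
  stationB.getD 0 0 ≠ stationA.getD 0 0 ∧ stationB.getD 1 0 ≠ stationA.getD 1 0
instance (stationA : List Int) (stationB : List Int) (mapWidth : Int) (mapHeight : Int) : Decidable (Pre_calcNodes stationA stationB mapWidth mapHeight) := by unfold Pre_calcNodes; infer_instance

def pvWitness_calcNodes : List Int × List Int × Int × Int := ([0, 0], [2, 3], 5, 5)

def Spec_calcNodes (stationA : List Int) (stationB : List Int) (mapWidth : Int) (mapHeight : Int) (out : List (List Int)) : Prop := out = calcNodes_alt stationA stationB mapWidth mapHeight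
instance (stationA : List Int) (stationB : List Int) (mapWidth : Int) (mapHeight : Int) (out : List (List Int)) : Decidable (Spec_calcNodes stationA stationB mapWidth mapHeight out) := by unfold Spec_calcNodes; infer_instance

-- ===== CLAIM (what is proved, stated in full; the proofs are below) =====
def Claim_equal_calcNodes : Prop := ∀ (stationA : List Int) (stationB : List Int) (mapWidth : Int) (mapHeight : Int), Dom_calcNodes stationA stationB mapWidth mapHeight → Pre_calcNodes stationA stationB mapWidth mapHeight → Spec_calcNodes stationA stationB mapWidth mapHeight (calcNodes stationA stationB mapWidth mapHeight)

-- ===== LEMMAS AND PROOFS =====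

-- membership of x in the interval produced by pvInterval is exactly the pair of linear inequalities it solves
lemma pvInterval_mem (c step lim x : Int) (hs : step ≠ 0) :
    ((pvInterval c step lim).1 ≤ x ∧ x ≤ (pvInterval c step lim).2) ↔
      (0 ≤ c + x * step ∧ c + x * step ≤ lim) := by
  unfold pvInterval
  rcases lt_trichotomy step 0 with hneg | rfl | hpos
  · rw [if_neg (by omega)]
    simp only
    rw [neg_le, PySem.Int.le_floordiv_iff_mul_le (by omega : (0:Int) < -step),
        PySem.Int.le_floordiv_iff_mul_le (by omega : (0:Int) < -step)]
    constructor <;> rintro ⟨h1, h2⟩ <;> constructor <;> nlinarith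
  · omega
  · rw [if_pos hpos]
    simp only
    rw [neg_le, PySem.Int.le_floordiv_iff_mul_le hpos,
        PySem.Int.le_floordiv_iff_mul_le hpos]
    constructor <;> rintro ⟨h1, h2⟩ <;> constructor <;> nlinarith

-- membership after pvClip, for x already inside [0, maxIter-1]
lemma pvClip_mem (maxIter xlo xhi ylo yhi x : Int) (hx0 : 0 ≤ x) (hxn : x ≤ maxIter - 1) :
    ((pvClip maxIter xlo xhi ylo yhi).1 ≤ x ∧ x ≤ (pvClip maxIter xlo xhi ylo yhi).2) ↔
      ((xlo ≤ x ∧ x ≤ xhi) ∧ (ylo ≤ x ∧ x ≤ yhi)) := by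
  unfold pvClip; dsimp only; split_ifs <;> omega

-- pvClip produces an interval that is inside [0, maxIter-1] or the canonical empty interval (0, -1)
lemma pvClip_shape (maxIter xlo xhi ylo yhi : Int) :
    (0 ≤ (pvClip maxIter xlo xhi ylo yhi).1 ∧ (pvClip maxIter xlo xhi ylo yhi).1 ≤ (pvClip maxIter xlo xhi ylo yhi).2 ∧ (pvClip maxIter xlo xhi ylo yhi).2 ≤ maxIter - 1)
      ∨ ((pvClip maxIter xlo xhi ylo yhi).1 = 0 ∧ (pvClip maxIter xlo xhi ylo yhi).2 = -1) := by
  unfold pvClip; dsimp only; split_ifs <;> omega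

-- per-x evaluation of the merged emission body on a range where neither interval is active
lemma piece_nil {α : Type} (f g : Int → α) (la ha lb hb lo hi : Int)
    (h1 : hi ≤ la ∨ ha + 1 ≤ lo) (h2 : hi ≤ lb ∨ hb + 1 ≤ lo) :
    (PySem.List.pyRange lo hi 1).flatMap (fun x =>
        (if la ≤ x ∧ x ≤ ha then [f x] else []) ++ (if lb ≤ x ∧ x ≤ hb then [g x] else [])) = [] := by
  refine (List.flatMap_congr (g := fun _ => []) ?_).trans (by simp)
  intro x hx; rw [PySem.List.mem_pyRange_one] at hx
  rw [if_neg (by omega), if_neg (by omega)]; rfl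

-- … where only the first interval is active
lemma piece_f {α : Type} (f g : Int → α) (la ha lb hb lo hi : Int)
    (h1 : la ≤ lo) (h2 : hi ≤ ha + 1) (h3 : hi ≤ lb ∨ hb + 1 ≤ lo) :
    (PySem.List.pyRange lo hi 1).flatMap (fun x =>
        (if la ≤ x ∧ x ≤ ha then [f x] else []) ++ (if lb ≤ x ∧ x ≤ hb then [g x] else [])) =
      (PySem.List.pyRange lo hi 1).map f := by
  refine (List.flatMap_congr (g := fun x => [f x]) ?_).trans List.map_eq_flatMap.symm
  intro x hx; rw [PySem.List.mem_pyRange_one] at hx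
  rw [if_pos (by omega), if_neg (by omega)]; rfl

-- … where only the second interval is active
lemma piece_g {α : Type} (f g : Int → α) (la ha lb hb lo hi : Int)
    (h1 : lb ≤ lo) (h2 : hi ≤ hb + 1) (h3 : hi ≤ la ∨ ha + 1 ≤ lo) :
    (PySem.List.pyRange lo hi 1).flatMap (fun x =>
        (if la ≤ x ∧ x ≤ ha then [f x] else []) ++ (if lb ≤ x ∧ x ≤ hb then [g x] else [])) =
      (PySem.List.pyRange lo hi 1).map g := by
  refine (List.flatMap_congr (g := fun x => [g x]) ?_).trans List.map_eq_flatMap.symm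
  intro x hx; rw [PySem.List.mem_pyRange_one] at hx
  rw [if_neg (by omega), if_pos (by omega)]; rfl

-- … where both intervals are active
lemma piece_fg {α : Type} (f g : Int → α) (la ha lb hb lo hi : Int)
    (h1 : la ≤ lo) (h2 : hi ≤ ha + 1) (h3 : lb ≤ lo) (h4 : hi ≤ hb + 1) :
    (PySem.List.pyRange lo hi 1).flatMap (fun x =>
        (if la ≤ x ∧ x ≤ ha then [f x] else []) ++ (if lb ≤ x ∧ x ≤ hb then [g x] else [])) =
      (PySem.List.pyRange lo hi 1).flatMap (fun x => [f x, g x]) := by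
  refine List.flatMap_congr ?_
  intro x hx; rw [PySem.List.mem_pyRange_one] at hx
  rw [if_pos (by omega), if_pos (by omega)]; rfl
lemma merge5 {α : Type} (f g : Int → α) (n la ha lb hb : Int)
    (hA : (0 ≤ la ∧ la ≤ ha ∧ ha ≤ n - 1) ∨ (la = 0 ∧ ha = -1))
    (hB : (0 ≤ lb ∧ lb ≤ hb ∧ hb ≤ n - 1) ∨ (lb = 0 ∧ hb = -1)) :
    (PySem.List.pyRange 0 n 1).flatMap (fun x =>
        (if la ≤ x ∧ x ≤ ha then [f x] else []) ++ (if lb ≤ x ∧ x ≤ hb then [g x] else []))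
      = (PySem.List.pyRange la (min ha (lb - 1) + 1) 1).map f
        ++ (PySem.List.pyRange lb (min hb (la - 1) + 1) 1).map g
        ++ (PySem.List.pyRange (max la lb) (min ha hb + 1) 1).flatMap (fun x => [f x, g x])
        ++ (PySem.List.pyRange (max la (hb + 1)) (ha + 1) 1).map f
        ++ (PySem.List.pyRange (max lb (ha + 1)) (hb + 1) 1).map g := by
  rcases hA with ⟨hA0, hA1, hA2⟩ | ⟨rfl, rfl⟩
  · rcases hB with ⟨hB0, hB1, hB2⟩ | ⟨rfl, rfl⟩
    · -- both nonempty
      rcases Int.lt_or_le ha lb with hd | ho1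
      · -- disjoint, A first: [0,la) [la,ha+1) [ha+1,lb) [lb,hb+1) [hb+1,n)
        rw [PySem.List.pyRange_one_append 0 la n (by omega) (by omega),
            PySem.List.pyRange_one_append la (ha+1) n (by omega) (by omega),
            PySem.List.pyRange_one_append (ha+1) lb n (by omega) (by omega),
            PySem.List.pyRange_one_append lb (hb+1) n (by omega) (by omega)]
        simp only [List.flatMap_append]
        rw [piece_nil f g la ha lb hb 0 la (by omega) (by omega),
            piece_f f g la ha lb hb la (ha+1) (by omega) (by omega) (by omega),
            piece_nil f g la ha lb hb (ha+1) lb (by omega) (by omega),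
            piece_g f g la ha lb hb lb (hb+1) (by omega) (by omega) (by omega),
            piece_nil f g la ha lb hb (hb+1) n (by omega) (by omega)]
        rw [show min ha (lb-1) + 1 = ha + 1 by omega,
            show min hb (la-1) + 1 = min hb (la-1) + 1 by rfl,
            PySem.List.pyRange_one_eq_nil (a := lb) (b := min hb (la-1) + 1) (by omega),
            PySem.List.pyRange_one_eq_nil (a := max la lb) (b := min ha hb + 1) (by omega),
            PySem.List.pyRange_one_eq_nil (a := max la (hb+1)) (b := ha + 1) (by omega),
            show max lb (ha+1) = lb by omega]
        simp
      · rcases Int.lt_or_le hb la with hd | ho2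
        · -- disjoint, B first
          rw [PySem.List.pyRange_one_append 0 lb n (by omega) (by omega),
              PySem.List.pyRange_one_append lb (hb+1) n (by omega) (by omega),
              PySem.List.pyRange_one_append (hb+1) la n (by omega) (by omega),
              PySem.List.pyRange_one_append la (ha+1) n (by omega) (by omega)]
          simp only [List.flatMap_append]
          rw [piece_nil f g la ha lb hb 0 lb (by omega) (by omega),
              piece_g f g la ha lb hb lb (hb+1) (by omega) (by omega) (by omega),
              piece_nil f g la ha lb hb (hb+1) la (by omega) (by omega),
              piece_f f g la ha lb hb la (ha+1) (by omega) (by omega) (by omega),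
              piece_nil f g la ha lb hb (ha+1) n (by omega) (by omega)]
          rw [PySem.List.pyRange_one_eq_nil (a := la) (b := min ha (lb-1) + 1) (by omega),
              show min hb (la-1) + 1 = hb + 1 by omega,
              PySem.List.pyRange_one_eq_nil (a := max la lb) (b := min ha hb + 1) (by omega),
              show max la (hb+1) = la by omega,
              PySem.List.pyRange_one_eq_nil (a := max lb (ha+1)) (b := hb + 1) (by omega)]
          simp
        · -- overlap
          rcases Int.lt_or_le lb la |>.symm with hl | hl
          · rcases Int.lt_or_le hb ha |>.symm with hh | hh
            · -- la ≤ lb, ha ≤ hb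
              rw [PySem.List.pyRange_one_append 0 la n (by omega) (by omega),
                  PySem.List.pyRange_one_append la lb n (by omega) (by omega),
                  PySem.List.pyRange_one_append lb (ha+1) n (by omega) (by omega),
                  PySem.List.pyRange_one_append (ha+1) (hb+1) n (by omega) (by omega)]
              simp only [List.flatMap_append]
              rw [piece_nil f g la ha lb hb 0 la (by omega) (by omega),
                  piece_f f g la ha lb hb la lb (by omega) (by omega) (by omega),
                  piece_fg f g la ha lb hb lb (ha+1) (by omega) (by omega) (by omega) (by omega),
                  piece_g f g la ha lb hb (ha+1) (hb+1) (by omega) (by omega) (by omega),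
                  piece_nil f g la ha lb hb (hb+1) n (by omega) (by omega)]
              rw [show min ha (lb-1) + 1 = lb by omega,
                  PySem.List.pyRange_one_eq_nil (a := lb) (b := min hb (la-1) + 1) (by omega),
                  show max la lb = lb by omega, show min ha hb + 1 = ha + 1 by omega,
                  PySem.List.pyRange_one_eq_nil (a := max la (hb+1)) (b := ha + 1) (by omega),
                  show max lb (ha+1) = ha + 1 by omega]
              simp
            · -- la ≤ lb, hb < ha
              rw [PySem.List.pyRange_one_append 0 la n (by omega) (by omega),
                  PySem.List.pyRange_one_append la lb n (by omega) (by omega),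
                  PySem.List.pyRange_one_append lb (hb+1) n (by omega) (by omega),
                  PySem.List.pyRange_one_append (hb+1) (ha+1) n (by omega) (by omega)]
              simp only [List.flatMap_append]
              rw [piece_nil f g la ha lb hb 0 la (by omega) (by omega),
                  piece_f f g la ha lb hb la lb (by omega) (by omega) (by omega),
                  piece_fg f g la ha lb hb lb (hb+1) (by omega) (by omega) (by omega) (by omega),
                  piece_f f g la ha lb hb (hb+1) (ha+1) (by omega) (by omega) (by omega),
                  piece_nil f g la ha lb hb (ha+1) n (by omega) (by omega)]
              rw [show min ha (lb-1) + 1 = lb by omega,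
                  PySem.List.pyRange_one_eq_nil (a := lb) (b := min hb (la-1) + 1) (by omega),
                  show max la lb = lb by omega, show min ha hb + 1 = hb + 1 by omega,
                  show max la (hb+1) = hb + 1 by omega,
                  PySem.List.pyRange_one_eq_nil (a := max lb (ha+1)) (b := hb + 1) (by omega)]
              simp
          · rcases Int.lt_or_le hb ha |>.symm with hh | hh
            · -- lb < la, ha ≤ hb
              rw [PySem.List.pyRange_one_append 0 lb n (by omega) (by omega),
                  PySem.List.pyRange_one_append lb la n (by omega) (by omega),
                  PySem.List.pyRange_one_append la (ha+1) n (by omega) (by omega),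
                  PySem.List.pyRange_one_append (ha+1) (hb+1) n (by omega) (by omega)]
              simp only [List.flatMap_append]
              rw [piece_nil f g la ha lb hb 0 lb (by omega) (by omega),
                  piece_g f g la ha lb hb lb la (by omega) (by omega) (by omega),
                  piece_fg f g la ha lb hb la (ha+1) (by omega) (by omega) (by omega) (by omega),
                  piece_g f g la ha lb hb (ha+1) (hb+1) (by omega) (by omega) (by omega),
                  piece_nil f g la ha lb hb (hb+1) n (by omega) (by omega)]
              rw [PySem.List.pyRange_one_eq_nil (a := la) (b := min ha (lb-1) + 1) (by omega),
                  show min hb (la-1) + 1 = la by omega,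
                  show max la lb = la by omega, show min ha hb + 1 = ha + 1 by omega,
                  PySem.List.pyRange_one_eq_nil (a := max la (hb+1)) (b := ha + 1) (by omega),
                  show max lb (ha+1) = ha + 1 by omega]
              simp
            · -- lb < la, hb < ha
              rw [PySem.List.pyRange_one_append 0 lb n (by omega) (by omega),
                  PySem.List.pyRange_one_append lb la n (by omega) (by omega),
                  PySem.List.pyRange_one_append la (hb+1) n (by omega) (by omega),
                  PySem.List.pyRange_one_append (hb+1) (ha+1) n (by omega) (by omega)]
              simp only [List.flatMap_append]
              rw [piece_nil f g la ha lb hb 0 lb (by omega) (by omega),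
                  piece_g f g la ha lb hb lb la (by omega) (by omega) (by omega),
                  piece_fg f g la ha lb hb la (hb+1) (by omega) (by omega) (by omega) (by omega),
                  piece_f f g la ha lb hb (hb+1) (ha+1) (by omega) (by omega) (by omega),
                  piece_nil f g la ha lb hb (ha+1) n (by omega) (by omega)]
              rw [PySem.List.pyRange_one_eq_nil (a := la) (b := min ha (lb-1) + 1) (by omega),
                  show min hb (la-1) + 1 = la by omega,
                  show max la lb = la by omega, show min ha hb + 1 = hb + 1 by omega,
                  show max la (hb+1) = hb + 1 by omega,
                  PySem.List.pyRange_one_eq_nil (a := max lb (ha+1)) (b := hb + 1) (by omega)]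
              simp
    · -- A nonempty, B empty
      rw [PySem.List.pyRange_one_append 0 la n (by omega) (by omega),
          PySem.List.pyRange_one_append la (ha+1) n (by omega) (by omega)]
      simp only [List.flatMap_append]
      rw [piece_nil f g la ha 0 (-1) 0 la (by omega) (by omega),
          piece_f f g la ha 0 (-1) la (ha+1) (by omega) (by omega) (by omega),
          piece_nil f g la ha 0 (-1) (ha+1) n (by omega) (by omega)]
      rw [PySem.List.pyRange_one_eq_nil (a := la) (b := min ha (0-1) + 1) (by omega),
          PySem.List.pyRange_one_eq_nil (a := (0:Int)) (b := min (-1) (la-1) + 1) (by omega),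
          PySem.List.pyRange_one_eq_nil (a := max la 0) (b := min ha (-1) + 1) (by omega),
          show max la ((-1)+1) = la by omega,
          PySem.List.pyRange_one_eq_nil (a := max 0 (ha+1)) (b := (-1) + 1) (by omega)]
      simp
  · rcases hB with ⟨hB0, hB1, hB2⟩ | ⟨rfl, rfl⟩
    · -- A empty, B nonempty
      rw [PySem.List.pyRange_one_append 0 lb n (by omega) (by omega),
          PySem.List.pyRange_one_append lb (hb+1) n (by omega) (by omega)]
      simp only [List.flatMap_append]
      rw [piece_nil f g 0 (-1) lb hb 0 lb (by omega) (by omega),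
          piece_g f g 0 (-1) lb hb lb (hb+1) (by omega) (by omega) (by omega),
          piece_nil f g 0 (-1) lb hb (hb+1) n (by omega) (by omega)]
      rw [PySem.List.pyRange_one_eq_nil (a := (0:Int)) (b := min (-1) (lb-1) + 1) (by omega),
          PySem.List.pyRange_one_eq_nil (a := lb) (b := min hb (0-1) + 1) (by omega),
          PySem.List.pyRange_one_eq_nil (a := max 0 lb) (b := min (-1) hb + 1) (by omega),
          PySem.List.pyRange_one_eq_nil (a := max 0 (hb+1)) (b := (-1) + 1) (by omega),
          show max lb ((-1)+1) = lb by omega]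
      simp
    · -- both empty
      rw [piece_nil f g 0 (-1) 0 (-1) 0 n (by omega) (by omega)]
      simp [PySem.List.pyRange_one_eq_nil]

-- proof-only copies of the two bodies, with the four station coordinates as parameters
def pvLoopA (a0 a1 b0 b1 w h : Int) : List (List Int) :=
  let ox := b0 - a0
  let oy := b1 - a1
  let lowDenom := min |ox| |oy|
  let maxIter := -(PySem.Int.floordiv (-w) lowDenom)
  (PySem.List.pyRange 0 maxIter 1).foldl (fun nodesOnMap x =>
    let nodesOnMap :=
      if 0 ≤ a0 - x * ox ∧ a0 - x * ox ≤ w then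
        (if 0 ≤ a1 - x * oy ∧ a1 - x * oy ≤ h then nodesOnMap ++ [[a0 - x * ox, a1 - x * oy]] else nodesOnMap)
      else nodesOnMap
    if 0 ≤ b0 + x * ox ∧ b0 + x * ox ≤ w then
      (if 0 ≤ b1 + x * oy ∧ b1 + x * oy ≤ h then nodesOnMap ++ [[b0 + x * ox, b1 + x * oy]] else nodesOnMap)
    else nodesOnMap) []

def pvSegs (a0 a1 b0 b1 w h : Int) : List (List Int) :=
  let dx := b0 - a0
  let dy := b1 - a1
  let lowDenom := min |dx| |dy|
  let maxIter := -(PySem.Int.floordiv (-w) lowDenom)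
  let iA := pvInterval a0 (-dx) w
  let jA := pvInterval a1 (-dy) h
  let pA := pvClip maxIter iA.1 iA.2 jA.1 jA.2
  let iB := pvInterval b0 dx w
  let jB := pvInterval b1 dy h
  let pB := pvClip maxIter iB.1 iB.2 jB.1 jB.2
  let loA := pA.1; let hiA := pA.2
  let loB := pB.1; let hiB := pB.2
  let nodeA := fun x => [a0 - x * dx, a1 - x * dy]
  let nodeB := fun x => [b0 + x * dx, b1 + x * dy]
  (PySem.List.pyRange loA (min hiA (loB - 1) + 1) 1).map nodeA
    ++ (PySem.List.pyRange loB (min hiB (loA - 1) + 1) 1).map nodeB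
    ++ (PySem.List.pyRange (max loA loB) (min hiA hiB + 1) 1).flatMap (fun x => [nodeA x, nodeB x])
    ++ (PySem.List.pyRange (max loA (hiB + 1)) (hiA + 1) 1).map nodeA
    ++ (PySem.List.pyRange (max loB (hiA + 1)) (hiB + 1) 1).map nodeB

lemma calcNodes_eq_pvLoopA (sA sB : List Int) (w h : Int) :
    calcNodes sA sB w h = pvLoopA (PySem.List.pyGetD sA 0 0) (PySem.List.pyGetD sA 1 0) (PySem.List.pyGetD sB 0 0) (PySem.List.pyGetD sB 1 0) w h := rfl

lemma calcNodes_alt_eq_pvSegs (sA sB : List Int) (w h : Int) :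
    calcNodes_alt sA sB w h = pvSegs (PySem.List.pyGetD sA 0 0) (PySem.List.pyGetD sA 1 0) (PySem.List.pyGetD sB 0 0) (PySem.List.pyGetD sB 1 0) w h := rfl

-- the whole equivalence over the four extracted coordinates and the map bounds
set_option maxHeartbeats 1000000 in
lemma calc_main (a0 a1 b0 b1 w h : Int) (hdx : b0 - a0 ≠ 0) (hdy : b1 - a1 ≠ 0) :
    pvLoopA a0 a1 b0 b1 w h = pvSegs a0 a1 b0 b1 w h := by
  unfold pvLoopA pvSegs
  dsimp only
  set n := -(PySem.Int.floordiv (-w) (min |b0 - a0| |b1 - a1|)) with hn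
  set pA := pvClip n (pvInterval a0 (-(b0 - a0)) w).1 (pvInterval a0 (-(b0 - a0)) w).2 (pvInterval a1 (-(b1 - a1)) h).1 (pvInterval a1 (-(b1 - a1)) h).2 with hpA
  set pB := pvClip n (pvInterval b0 (b0 - a0) w).1 (pvInterval b0 (b0 - a0) w).2 (pvInterval b1 (b1 - a1) h).1 (pvInterval b1 (b1 - a1) h).2 with hpB
  refine (PySem.List.foldl_congr_mem (g := fun (acc : List (List Int)) x => acc ++
      ((if pA.1 ≤ x ∧ x ≤ pA.2 then [[a0 - x * (b0 - a0), a1 - x * (b1 - a1)]] else [])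
        ++ (if pB.1 ≤ x ∧ x ≤ pB.2 then [[b0 + x * (b0 - a0), b1 + x * (b1 - a1)]] else []))) _ _ _ ?_).trans ?_
  · intro acc x hx
    rw [PySem.List.mem_pyRange_one] at hx
    beta_reduce
    have eA : (pA.1 ≤ x ∧ x ≤ pA.2) ↔
        ((0 ≤ a0 - x * (b0 - a0) ∧ a0 - x * (b0 - a0) ≤ w) ∧ (0 ≤ a1 - x * (b1 - a1) ∧ a1 - x * (b1 - a1) ≤ h)) := by
      rw [hpA, pvClip_mem _ _ _ _ _ _ (by omega) (by omega),
          pvInterval_mem _ _ _ _ (by omega : -(b0 - a0) ≠ 0),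
          pvInterval_mem _ _ _ _ (by omega : -(b1 - a1) ≠ 0)]
      have e1 : a0 + x * -(b0 - a0) = a0 - x * (b0 - a0) := by ring
      have e2 : a1 + x * -(b1 - a1) = a1 - x * (b1 - a1) := by ring
      rw [e1, e2]
    have eB : (pB.1 ≤ x ∧ x ≤ pB.2) ↔
        ((0 ≤ b0 + x * (b0 - a0) ∧ b0 + x * (b0 - a0) ≤ w) ∧ (0 ≤ b1 + x * (b1 - a1) ∧ b1 + x * (b1 - a1) ≤ h)) := by
      rw [hpB, pvClip_mem _ _ _ _ _ _ (by omega) (by omega),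
          pvInterval_mem _ _ _ _ hdx, pvInterval_mem _ _ _ _ hdy]
    rw [if_congr eA rfl rfl, if_congr eB rfl rfl]
    split_ifs <;> simp_all <;> linarith
  rw [PySem.List.foldl_append_eq_flatMap, List.nil_append]
  have M := merge5 (fun x => [a0 - x * (b0 - a0), a1 - x * (b1 - a1)])
      (fun x => [b0 + x * (b0 - a0), b1 + x * (b1 - a1)]) n pA.1 pA.2 pB.1 pB.2
      (by rw [hpA]; exact pvClip_shape _ _ _ _ _) (by rw [hpB]; exact pvClip_shape _ _ _ _ _)
  beta_reduce at M
  rw [M]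

theorem calcNodes_spec : Claim_equal_calcNodes := by
  intro sA sB w h _ hpre
  obtain ⟨hlA, hlB, hdx, hdy⟩ := hpre
  unfold Spec_calcNodes
  rw [calcNodes_eq_pvLoopA, calcNodes_alt_eq_pvSegs]
  rcases sA with _ | ⟨a0, sA'⟩; · simp at hlA
  rcases sA' with _ | ⟨a1, tA⟩; · simp at hlA
  rcases sB with _ | ⟨b0, sB'⟩; · simp at hlB
  rcases sB' with _ | ⟨b1, tB⟩; · simp at hlB
  have e0 : ∀ (u v : Int) (t : List Int), PySem.List.pyGetD (u::v::t) 0 0 = u := by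
    intro u v t; simp [pysem]
  have e1 : ∀ (u v : Int) (t : List Int), PySem.List.pyGetD (u::v::t) 1 0 = v := by
    intro u v t; simp [pysem]
  rw [e0, e1, e0, e1]
  simp only [List.getD_cons_zero, List.getD_cons_succ] at hdx hdy
  exact calc_main a0 a1 b0 b1 w h (sub_ne_zero.mpr hdx) (sub_ne_zero.mpr hdy)
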